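-- pv_equiv track=rewrite | github.com/Skyffox/Advent-of-Code | 2022/day14.py | draw_canvas
-- ===== SOURCE A (Python) =====
-- from typing import List, Tuple
--
-- def draw_canvas(walls: List[List[int]], min_x: int, max_x: int, max_y: int) -> List[List[str]]:
--     """
--     Creates a visual representation of the terrain with walls and sand source.
--
--     Args:
--         walls (List[List[int]]): The list of wall coordinates.
--         min_x (int): The minimum x-coordinate of the grid.
--         max_x (int): The maximum x-coordinate of the grid.
--         max_y (int): The maximum y-coordinate of the grid.
--
--     Returns:
--         List[List[str]]: A 2D grid where walls are represented as '#', air as '.', and the sand source as '+'.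
--     """
--     canvas = []
--     for y in range(max_y + 1):
--         canvas_line = []
--         for pos_x in range(min_x, max_x + 1):
--             if [pos_x, y] in walls:
--                 canvas_line.append("# ")
--             elif [pos_x, y] == [500, 0]:
--                 canvas_line.append("+ ")
--             else:
--                 canvas_line.append(". ")
--         canvas.append(canvas_line)
--
--     return canvas
-- ===== SOURCE B (Python) =====
-- def draw_canvas(walls, min_x, max_x, max_y):
--     # Pre-fill the grid with air, place the source, then scatter walls in one
--     # pass over the wall list (instead of a membership scan per cell).
--     canvas = [[". " for _ in range(min_x, max_x + 1)] for _ in range(max_y + 1)]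
--     if min_x <= 500 <= max_x and 0 <= max_y:
--         canvas[0][500 - min_x] = "+ "
--     for w in walls:
--         if len(w) == 2:
--             x, y = w
--             if min_x <= x <= max_x and 0 <= y <= max_y:
--                 canvas[y][x - min_x] = "# "
--     return canvas
-- ===== Notes on version B (the rewrite author's own statement) =====
-- stated objective: alternative
-- what changed: Instead of testing every grid cell for membership in the wall list, B pre-fills the grid with air, places the source, and scatters each in-range wall onto the grid in a single pass over walls (per-cell scan removed; the grid fill itself still dominates, so a timing run did not confirm a speedup).
import Mathlib
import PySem

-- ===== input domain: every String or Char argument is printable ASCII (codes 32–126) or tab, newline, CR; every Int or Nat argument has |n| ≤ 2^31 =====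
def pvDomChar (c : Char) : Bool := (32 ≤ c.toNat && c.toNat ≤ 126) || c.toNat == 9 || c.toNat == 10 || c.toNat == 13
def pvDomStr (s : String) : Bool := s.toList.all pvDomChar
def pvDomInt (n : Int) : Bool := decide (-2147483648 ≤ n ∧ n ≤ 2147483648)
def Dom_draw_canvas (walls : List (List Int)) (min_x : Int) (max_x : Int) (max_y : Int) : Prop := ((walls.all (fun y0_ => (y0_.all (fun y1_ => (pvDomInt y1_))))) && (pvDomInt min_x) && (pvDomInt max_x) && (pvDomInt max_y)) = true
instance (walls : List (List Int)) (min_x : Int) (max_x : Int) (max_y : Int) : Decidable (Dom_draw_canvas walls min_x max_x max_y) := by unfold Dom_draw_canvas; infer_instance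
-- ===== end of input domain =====

-- B scatters walls onto a pre-filled grid in one pass over the wall list instead of A's per-cell membership scan (alternative algorithm; timing run did not confirm a speedup).

-- ===== PORT A =====
-- the two nested append loops of A, as foldl over the same ranges
def draw_canvas (walls : List (List Int)) (min_x : Int) (max_x : Int) (max_y : Int) : List (List String) :=
  (PySem.List.pyRange 0 (max_y + 1) 1).foldl (fun canvas y =>
    canvas ++ [(PySem.List.pyRange min_x (max_x + 1) 1).foldl (fun line pos_x =>
      line ++ [if [pos_x, y] ∈ walls then "# "
               else if ([pos_x, y] : List Int) = [500, 0] then "+ "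
               else ". "]) []]) []

-- ===== PORT B =====
-- canvas[y][x - min_x] = "# "  (guarded in-range, so toNat is exact)
def pvScatter (min_x max_x max_y : Int) (cs : List (List String)) (w : List Int) : List (List String) :=
  match w with
  | [x, y] =>
      if min_x ≤ x ∧ x ≤ max_x ∧ 0 ≤ y ∧ y ≤ max_y then
        cs.modify y.toNat (fun row => row.set (x - min_x).toNat "# ")
      else cs
  | _ => cs

def pvBase (min_x max_x max_y : Int) : List (List String) :=
  (PySem.List.pyRange 0 (max_y + 1) 1).map (fun _ =>
    (PySem.List.pyRange min_x (max_x + 1) 1).map (fun _ => ". "))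

-- canvas[0][500 - min_x] = "+ "  (guarded in-range, so toNat is exact)
def pvInit (min_x max_x max_y : Int) : List (List String) :=
  if min_x ≤ 500 ∧ 500 ≤ max_x ∧ 0 ≤ max_y then
    (pvBase min_x max_x max_y).modify 0 (fun row => row.set (500 - min_x).toNat "+ ")
  else pvBase min_x max_x max_y

def draw_canvas_alt (walls : List (List Int)) (min_x : Int) (max_x : Int) (max_y : Int) : List (List String) :=
  walls.foldl (pvScatter min_x max_x max_y) (pvInit min_x max_x max_y)

-- ===== PRECONDITION & SPEC =====
def Spec_draw_canvas (walls : List (List Int)) (min_x : Int) (max_x : Int) (max_y : Int) (out : List (List String)) : Prop := out = draw_canvas_alt walls min_x max_x max_y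
instance (walls : List (List Int)) (min_x : Int) (max_x : Int) (max_y : Int) (out : List (List String)) : Decidable (Spec_draw_canvas walls min_x max_x max_y out) := by unfold Spec_draw_canvas; infer_instance

-- ===== CLAIM (what is proved, stated in full; the proofs are below) =====
def Claim_equal_draw_canvas : Prop := ∀ (walls : List (List Int)) (min_x : Int) (max_x : Int) (max_y : Int), Dom_draw_canvas walls min_x max_x max_y → Spec_draw_canvas walls min_x max_x max_y (draw_canvas walls min_x max_x max_y)

-- ===== LEMMAS AND PROOFS =====

-- wall w writes "# " into cell (y, x) of the grid
def pvHits (min_x max_x max_y : Int) (w : List Int) (y x : Nat) : Bool :=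
  decide (w = [min_x + (x : Int), (y : Int)] ∧ min_x + (x : Int) ≤ max_x ∧ (y : Int) ≤ max_y)

theorem pv_mapIdx_id {α : Type} (l : List α) : l.mapIdx (fun _ v => v) = l := by
  apply List.ext_getElem?
  intro i
  simp [List.getElem?_mapIdx]

theorem pv_mapIdx_congr {α β : Type} (f g : Nat → α → β) (l : List α)
    (h : ∀ i a, f i a = g i a) : l.mapIdx f = l.mapIdx g := by
  have hfg : f = g := funext fun i => funext fun a => h i a
  rw [hfg]

theorem pv_set_eq_mapIdx {α : Type} (row : List α) (t : Nat) (v : α) :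
    row.set t v = row.mapIdx (fun x w => if x = t then v else w) := by
  apply List.ext_getElem?
  intro i
  by_cases hi : i < row.length
  · by_cases ht : i = t
    · subst ht
      simp [hi]
    · simp [hi, ht, Ne.symm ht]
  · have h1 : row[i]? = none := List.getElem?_eq_none (by omega)
    have h2 : (row.set t v)[i]? = none := List.getElem?_eq_none (by simp; omega)
    simp [List.getElem?_mapIdx, h1, h2]

theorem pvScatter_get (min_x max_x max_y : Int) (cs : List (List String))
    (w : List Int) (y : Nat) :
    (pvScatter min_x max_x max_y cs w)[y]? =
      cs[y]?.map (fun row => row.mapIdx (fun x v =>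
        if pvHits min_x max_x max_y w y x then "# " else v)) := by
  match w with
  | [x0, y0] =>
    by_cases hg : min_x ≤ x0 ∧ x0 ≤ max_x ∧ 0 ≤ y0 ∧ y0 ≤ max_y
    · by_cases hy : y0.toNat = y
      · have hrow : ∀ row : List String,
            row.set (x0 - min_x).toNat "# " = row.mapIdx (fun x v =>
              if pvHits min_x max_x max_y [x0, y0] y x then "# " else v) := by
          intro row
          rw [pv_set_eq_mapIdx]
          apply pv_mapIdx_congr
          intro i a
          have : (i = (x0 - min_x).toNat) ↔
              (pvHits min_x max_x max_y [x0, y0] y i = true) := by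
            simp only [pvHits, decide_eq_true_eq, List.cons.injEq, and_true]
            constructor
            · intro h; subst h; omega
            · rintro ⟨⟨h1, h2⟩, _⟩; omega
          by_cases hc : i = (x0 - min_x).toNat
          · rw [if_pos hc, if_pos (this.mp hc)]
          · rw [if_neg hc, if_neg (fun h => hc (this.mpr h))]
        simp only [pvScatter]
        rw [if_pos hg, List.getElem?_modify]
        cases hc : cs[y]? with
        | none => simp
        | some row => simp [hy, hrow row]
      · have hfalse : ∀ i, pvHits min_x max_x max_y [x0, y0] y i = false := by
          intro i
          simp only [pvHits, decide_eq_false_iff_not]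
          rintro ⟨h, -, -⟩
          simp only [List.cons.injEq, and_true] at h
          omega
        simp only [pvScatter]
        rw [if_pos hg, List.getElem?_modify]
        cases hc : cs[y]? with
        | none => simp
        | some row => simp [hy, hfalse, pv_mapIdx_id]
    · have hfalse : ∀ i, pvHits min_x max_x max_y [x0, y0] y i = false := by
        intro i
        simp only [pvHits, decide_eq_false_iff_not]
        rintro ⟨h, h1, h2⟩
        simp only [List.cons.injEq, and_true] at h
        obtain ⟨hx, hy'⟩ := h
        apply hg
        omega
      simp only [pvScatter]
      rw [if_neg hg]
      cases hc : cs[y]? with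
      | none => simp
      | some row => simp [hfalse, pv_mapIdx_id]
  | [] =>
    have : ∀ i, pvHits min_x max_x max_y [] y i = false := by intro i; simp [pvHits]
    simp [pvScatter, this, pv_mapIdx_id]
  | [a] =>
    have : ∀ i, pvHits min_x max_x max_y [a] y i = false := by intro i; simp [pvHits]
    simp [pvScatter, this, pv_mapIdx_id]
  | a :: b :: cc :: t =>
    have : ∀ i, pvHits min_x max_x max_y (a :: b :: cc :: t) y i = false := by
      intro i; simp [pvHits]
    simp [pvScatter, this, pv_mapIdx_id]

theorem pvScatter_foldl_get (min_x max_x max_y : Int) (walls : List (List Int))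
    (cs : List (List String)) (y : Nat) :
    (walls.foldl (pvScatter min_x max_x max_y) cs)[y]? =
      cs[y]?.map (fun row => row.mapIdx (fun x v =>
        if walls.any (fun w => pvHits min_x max_x max_y w y x) then "# " else v)) := by
  induction walls generalizing cs with
  | nil => simp [pv_mapIdx_id]
  | cons w ws ih =>
    rw [List.foldl_cons, ih, pvScatter_get, Option.map_map]
    cases hc : cs[y]? with
    | none => simp
    | some row =>
      simp only [Option.map_some, Function.comp, Option.some.injEq]
      rw [List.mapIdx_mapIdx]
      apply pv_mapIdx_congr
      intro i a
      simp only [List.any_cons, Function.comp]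
      by_cases h1 : pvHits min_x max_x max_y w y i = true
      · simp [h1]
      · simp [h1]

theorem pv_foldl_append_map {α β : Type} (l : List α) (f : α → β) :
    l.foldl (fun acc x => acc ++ [f x]) [] = l.map f := by
  have h : ∀ (init : List β), l.foldl (fun acc x => acc ++ [f x]) init = init ++ l.map f := by
    induction l with
    | nil => simp
    | cons a t ih => intro init; simp [ih]
  simpa using h []


theorem pvInit_length (min_x max_x max_y : Int) :
    (pvInit min_x max_x max_y).length = (max_y + 1 - 0).toNat := by
  unfold pvInit pvBase
  split_ifs <;>
    simp [List.length_modify, PySem.List.pyRange_one]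

theorem pvInit_get (min_x max_x max_y : Int) (yi : Nat)
    (hy : yi < (max_y + 1 - 0).toNat) :
    (pvInit min_x max_x max_y)[yi]? = some
      (if (min_x ≤ 500 ∧ 500 ≤ max_x ∧ 0 ≤ max_y) ∧ yi = 0 then
        (List.replicate (max_x + 1 - min_x).toNat ". ").set (500 - min_x).toNat "+ "
      else List.replicate (max_x + 1 - min_x).toNat ". ") := by
  have hbase : (pvBase min_x max_x max_y)[yi]? =
      some (List.replicate (max_x + 1 - min_x).toNat ". ") := by
    have hy' : yi < (max_y + 1).toNat := by omega
    unfold pvBase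
    simp [PySem.List.pyRange_one, List.map_map,
      hy', Function.comp_def, List.map_const', List.length_range]
  unfold pvInit
  by_cases hg : min_x ≤ 500 ∧ 500 ≤ max_x ∧ 0 ≤ max_y
  · rw [if_pos hg, List.getElem?_modify, hbase]
    by_cases h0 : yi = 0
    · simp [h0, hg]
    · simp [hg, h0, (show ¬ ((0 : Nat) = yi) from fun h => h0 h.symm)]
  · rw [if_neg hg, hbase]
    simp [hg]

-- ===== VERDICT (by name: the statement is the Claim_ definition above) =====
theorem draw_canvas_spec : Claim_equal_draw_canvas := by
  intro walls min_x max_x max_y _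
  unfold Spec_draw_canvas draw_canvas draw_canvas_alt
  apply List.ext_getElem?
  intro yi
  rw [pvScatter_foldl_get]
  simp only [pv_foldl_append_map, PySem.List.pyRange_one, List.map_map]
  by_cases hy : yi < (max_y + 1 - 0).toNat
  · rw [pvInit_get min_x max_x max_y yi hy]
    simp only [List.getElem?_map, List.getElem?_range, hy, Option.map_some,
      Function.comp, zero_add]
    refine congrArg some ?_
    apply List.ext_getElem?
    intro xi
    rw [List.getElem?_mapIdx]
    by_cases hx : xi < (max_x + 1 - min_x).toNat
    · have hrow : (if (min_x ≤ 500 ∧ 500 ≤ max_x ∧ 0 ≤ max_y) ∧ yi = 0 then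
          (List.replicate (max_x + 1 - min_x).toNat ". ").set (500 - min_x).toNat "+ "
        else List.replicate (max_x + 1 - min_x).toNat ". ")[xi]? = some
          (if (min_x ≤ 500 ∧ 500 ≤ max_x ∧ 0 ≤ max_y) ∧ yi = 0 ∧
              xi = (500 - min_x).toNat then "+ " else ". ") := by
        split_ifs with h1 h2 h3
        · obtain ⟨hg1, hy1⟩ := h1
          obtain ⟨-, -, hx1⟩ := h2
          rw [hx1, List.getElem?_set_self (by simp; omega)]
        · rw [List.getElem?_set_ne, List.getElem?_replicate_of_lt hx]
          intro hc
          exact h2 ⟨h1.1, h1.2, hc.symm⟩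
        · exact absurd ⟨h3.1, h3.2.1⟩ h1
        · exact List.getElem?_replicate_of_lt hx
      rw [hrow]
      simp only [List.getElem?_map, List.getElem?_range, hx, Option.map_some]
      refine congrArg some ?_
      simp only [Function.comp_apply]
      have hany : (walls.any (fun w => pvHits min_x max_x max_y w yi xi) = true) ↔
          ([min_x + (xi : Int), (yi : Int)] ∈ walls) := by
        simp only [List.any_eq_true, pvHits, decide_eq_true_eq]
        constructor
        · rintro ⟨w, hw, rfl, -, -⟩; exact hw
        · intro hm; exact ⟨_, hm, rfl, by omega, by omega⟩
      by_cases hm : ([min_x + (xi : Int), (yi : Int)] ∈ walls)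
      · have : walls.any (fun w => pvHits min_x max_x max_y w yi xi) = true := hany.mpr hm
        simp [hm, this]
      · have : walls.any (fun w => pvHits min_x max_x max_y w yi xi) = false :=
          Bool.eq_false_iff.mpr (fun h => hm (hany.mp h))
        rw [if_neg hm, this]
        simp only [Bool.false_eq_true, if_false]
        simp only [List.cons.injEq, and_true]
        by_cases h5 : min_x + (xi : Int) = 500 ∧ (yi : Int) = 0
        · rw [if_pos h5, if_pos ⟨⟨by omega, by omega, by omega⟩, by omega, by omega⟩]
        · rw [if_neg h5, if_neg]
          rintro ⟨⟨hg1, hg2, hg3⟩, h0, ht⟩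
          exact h5 ⟨by omega, by omega⟩
    · have h2 : (if (min_x ≤ 500 ∧ 500 ≤ max_x ∧ 0 ≤ max_y) ∧ yi = 0 then
          (List.replicate (max_x + 1 - min_x).toNat ". ").set (500 - min_x).toNat "+ "
        else List.replicate (max_x + 1 - min_x).toNat ". ")[xi]? = (none : Option String) := by
        apply List.getElem?_eq_none
        split_ifs <;> simp only [List.length_set, List.length_replicate] <;> omega
      rw [h2]
      simp only [Option.map_none]
      apply List.getElem?_eq_none
      simp only [List.length_map, List.length_range]
      omega
  · have h1 : (pvInit min_x max_x max_y)[yi]? = none :=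
      List.getElem?_eq_none (by rw [pvInit_length]; omega)
    rw [h1]
    simp only [Option.map_none]
    apply List.getElem?_eq_none
    simp only [List.length_map, List.length_range]
    omega
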